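-- pv_equiv track=rewrite | github.com/Yarik174/pattern_interruption | src/patterns/base.py | check_alternation
-- ===== SOURCE A (Python) =====
-- def check_alternation(results: list[str] | list[int]) -> int:
--     """Return trailing alternation count (from the end, breaking on repeat).
--
--     Reproduces ``MultiLeaguePatternEngine._check_alternation``.
--     """
--     if len(results) < 4:
--         return 0
--     alt_count = 0
--     for i in range(len(results) - 1, 0, -1):
--         if results[i] != results[i - 1]:
--             alt_count += 1
--         else:
--             break
--     return alt_count
-- ===== SOURCE B (Python) =====
-- def check_alternation(results):
--     """Return trailing alternation count (from the end, breaking on repeat).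
--
--     Forward scan: record the index of the LAST adjacent repeat, then the
--     answer is the distance from that index to the end of the list.
--     """
--     n = len(results)
--     if n < 4:
--         return 0
--     last_repeat = 0
--     for i in range(1, n):
--         if results[i] == results[i - 1]:
--             last_repeat = i
--     return n - 1 - last_repeat
-- ===== Notes on version B (the rewrite author's own statement) =====
-- stated objective: alternative
-- what changed: Replaces A's backward early-breaking counter with a forward index-finding pass (last adjacent-repeat index) plus a closed-form subtraction n-1-last_repeat.
import Mathlib
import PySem

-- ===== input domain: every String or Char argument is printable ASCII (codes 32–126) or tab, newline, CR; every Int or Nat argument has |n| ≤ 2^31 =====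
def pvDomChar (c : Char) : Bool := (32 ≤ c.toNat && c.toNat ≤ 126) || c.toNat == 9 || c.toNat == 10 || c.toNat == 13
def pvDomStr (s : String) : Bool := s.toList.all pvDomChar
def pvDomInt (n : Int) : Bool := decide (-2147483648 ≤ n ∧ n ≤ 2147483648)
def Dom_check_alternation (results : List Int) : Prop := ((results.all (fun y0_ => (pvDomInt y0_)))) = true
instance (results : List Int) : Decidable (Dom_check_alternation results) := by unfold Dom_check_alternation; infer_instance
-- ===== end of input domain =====

-- ===== PORT A =====
-- A: backward scan from the last index, counting adjacent differences until a repeat.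
-- Indices used are always in range (1 ≤ i ≤ length-1), so getD's default is never read.
def pvAuxA (r : List Int) : Nat → Nat
  | 0 => 0
  | i + 1 => if r.getD (i + 1) 0 ≠ r.getD i 0 then pvAuxA r i + 1 else 0

def check_alternation (results : List Int) : Int :=
  if results.length < 4 then 0 else (pvAuxA results (results.length - 1) : Int)

-- ===== PORT B =====
-- B: forward pass recording the last adjacent-repeat index, then closed-form subtraction.
def pvLastRepeat (r : List Int) (m : Nat) : Nat :=
  (List.range' 1 m).foldl (fun acc i => if r.getD i 0 = r.getD (i - 1) 0 then i else acc) 0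

def check_alternation_alt (results : List Int) : Int :=
  let n := results.length
  if n < 4 then 0
  else (n : Int) - 1 - (pvLastRepeat results (n - 1) : Int)

-- ===== PRECONDITION & SPEC =====
def Spec_check_alternation (results : List Int) (out : Int) : Prop := out = check_alternation_alt results
instance (results : List Int) (out : Int) : Decidable (Spec_check_alternation results out) := by unfold Spec_check_alternation; infer_instance

-- ===== CLAIM (what is proved, stated in full; the proofs are below) =====
def Claim_equal_check_alternation : Prop := ∀ (results : List Int), Dom_check_alternation results → Spec_check_alternation results (check_alternation results)

-- ===== LEMMAS AND PROOFS =====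

-- ===== VERDICT (by name: the statement is the Claim_ definition above) =====
theorem pvLastRepeat_succ (r : List Int) (m : Nat) :
    pvLastRepeat r (m + 1) =
      if r.getD (m + 1) 0 = r.getD m 0 then m + 1 else pvLastRepeat r m := by
  unfold pvLastRepeat
  rw [List.range'_1_concat, List.foldl_append]
  simp [Nat.add_comm]

theorem pvLastRepeat_le (r : List Int) (m : Nat) : pvLastRepeat r m ≤ m := by
  induction m with
  | zero => simp [pvLastRepeat]
  | succ k ih =>
    rw [pvLastRepeat_succ]
    split <;> omega

theorem pvAuxA_eq (r : List Int) (m : Nat) : pvAuxA r m = m - pvLastRepeat r m := by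
  induction m with
  | zero => simp [pvAuxA, pvLastRepeat]
  | succ k ih =>
    rw [pvLastRepeat_succ]
    simp only [pvAuxA, ih]
    have h := pvLastRepeat_le r k
    split_ifs with h1 h2 <;> omega

theorem check_alternation_spec : Claim_equal_check_alternation := by
  intro results _
  unfold Spec_check_alternation check_alternation check_alternation_alt
  by_cases h : results.length < 4
  · simp [h]
  · have hle := pvLastRepeat_le results (results.length - 1)
    simp only [h, if_false, pvAuxA_eq]
    omega
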